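-- pv_equiv track=rewrite | github.com/Soumyadeepaul/Code_Workout | One Segment.py | oneSegment
-- ===== SOURCE A (Python) =====
-- def oneSegment(str):
--     # Write your code here.
--     count=0
--     seq=0
--     for i in str:
--         if i=='1':
--             seq+=1
--         elif seq!=0:
--             count+=1
--             seq=0
--         if count>1:
--             return 0
--     if seq!=0 and str[-1]=='1':
--         count+=1
--     if count>1:
--         return 0
--     return 1
-- ===== SOURCE B (Python) =====
-- def oneSegment(str):
--     # Count run-starts of '1' by pairing each character with its predecessor.
--     runs = sum(p != '1' and c == '1' for p, c in zip('0' + str, str))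
--     return int(runs <= 1)
-- ===== Notes on version B (the rewrite author's own statement) =====
-- stated objective: idiomatic
-- what changed: Replaced the seq/count state machine with its early return and end-of-string fixup by a single comprehension counting run-starts (pairs where a '1' follows a non-'1'), then comparing that count to 1.
import Mathlib
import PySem

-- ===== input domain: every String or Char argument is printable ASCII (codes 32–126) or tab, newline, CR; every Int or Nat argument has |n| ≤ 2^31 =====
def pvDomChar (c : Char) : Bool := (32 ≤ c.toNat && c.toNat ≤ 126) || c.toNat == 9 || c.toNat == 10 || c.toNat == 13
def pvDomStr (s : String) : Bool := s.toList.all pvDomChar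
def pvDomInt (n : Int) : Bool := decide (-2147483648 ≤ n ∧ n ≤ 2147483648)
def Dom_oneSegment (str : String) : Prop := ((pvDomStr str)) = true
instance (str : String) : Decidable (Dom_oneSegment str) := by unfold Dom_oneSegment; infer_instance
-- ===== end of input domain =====

-- B replaces A's seq/count state machine (with early return and end-of-string fixup)
-- by one pass counting run-starts of '1' over predecessor/character pairs; same cost, plainer.

-- ===== PORT A =====
-- the for-loop with its early 'return 0' (the 'if count>1' check re-checked after each branch's update),
-- then at end of string the trailing fixup using str[-1]
def oneSegmentLoop (str : String) : List Char → Int → Int → Int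
  | [], count, seq =>
    let count := if seq ≠ 0 ∧ PySem.Str.pyGet? str (-1) = some '1' then count + 1 else count
    if count > 1 then 0 else 1
  | i :: rest, count, seq =>
    if i = '1' then
      if count > 1 then 0 else oneSegmentLoop str rest count (seq + 1)
    else if seq ≠ 0 then
      if count + 1 > 1 then 0 else oneSegmentLoop str rest (count + 1) 0
    else
      if count > 1 then 0 else oneSegmentLoop str rest count seq

def oneSegment (str : String) : Int := oneSegmentLoop str str.toList 0 0

-- ===== PORT B =====
def oneSegment_alt (str : String) : Int :=
  let runs : Int :=
    (List.zip ('0' :: str.toList) str.toList).foldl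
      (fun acc pc => acc + (if pc.1 ≠ '1' ∧ pc.2 = '1' then 1 else 0)) 0
  if runs ≤ 1 then 1 else 0

-- ===== PRECONDITION & SPEC =====
def Spec_oneSegment (str : String) (out : Int) : Prop := out = oneSegment_alt str
instance (str : String) (out : Int) : Decidable (Spec_oneSegment str out) := by unfold Spec_oneSegment; infer_instance

-- ===== CLAIM (what is proved, stated in full; the proofs are below) =====
def Claim_equal_oneSegment : Prop := ∀ (str : String), Dom_oneSegment str → Spec_oneSegment str (oneSegment str)

-- ===== LEMMAS AND PROOFS =====

-- number of run-starts of '1' in l, given the previous character p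
def runStarts (p : Char) : List Char → Int
  | [] => 0
  | c :: rest => (if p ≠ '1' ∧ c = '1' then 1 else 0) + runStarts c rest

theorem runStarts_nonneg (p : Char) (l : List Char) : 0 ≤ runStarts p l := by
  induction l generalizing p with
  | nil => simp [runStarts]
  | cons c rest ih =>
    have := ih c
    simp only [runStarts]
    split <;> omega

-- B's fold computes runStarts '0'
theorem foldl_zip_runStarts (p : Char) (l : List Char) (acc : Int) :
    (List.zip (p :: l) l).foldl
      (fun acc pc => acc + (if pc.1 ≠ '1' ∧ pc.2 = '1' then 1 else 0)) acc
    = acc + runStarts p l := by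
  induction l generalizing p acc with
  | nil => simp [runStarts]
  | cons c rest ih =>
    simp only [List.zip_cons_cons, List.foldl_cons, runStarts, ih]
    ring

-- main invariant: the loop returns 0 iff 'completed runs + open run + run starts ahead' exceeds 1
theorem oneSegmentLoop_eq (str : String) (l : List Char) (pre : List Char) (p : Char)
    (count seq : Int)
    (hpre : str.toList = pre ++ l)
    (hcount : 0 ≤ count) (hseqnn : 0 ≤ seq)
    (hseq : seq ≠ 0 ↔ p = '1')
    (hlast : seq ≠ 0 → pre.getLast? = some '1') :
    oneSegmentLoop str l count seq =
      if count + (if seq ≠ 0 then 1 else 0) + runStarts p l > 1 then 0 else 1 := by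
  induction l generalizing pre p count seq with
  | nil =>
    simp only [oneSegmentLoop, runStarts]
    by_cases h : seq ≠ 0
    · have hlast' : str.toList.getLast? = some '1' := by
        rw [hpre, List.append_nil]; exact hlast h
      have hget : PySem.Str.pyGet? str (-1) = some '1' := by
        simp [PySem.Str.pyGet?_eq, PySem.Chars.pyGet?_eq_listPyGet?,
          PySem.List.pyGet?_neg_one, hlast']
      have hcond : seq ≠ 0 ∧ PySem.Str.pyGet? str (-1) = some '1' := ⟨h, hget⟩
      rw [if_pos hcond]
      split_ifs <;> omega
    · have hcond : ¬ (seq ≠ 0 ∧ PySem.Str.pyGet? str (-1) = some '1') := fun hc => h hc.1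
      rw [if_neg hcond]
      split_ifs <;> omega
  | cons c rest ih =>
    have hrs := runStarts_nonneg c rest
    simp only [oneSegmentLoop]
    by_cases hc : c = '1'
    · subst hc
      rw [if_pos rfl]
      have hr : runStarts p ('1' :: rest) =
          (if seq ≠ 0 then 0 else 1) + runStarts '1' rest := by
        by_cases hs : seq ≠ 0
        · simp [runStarts, hseq.mp hs, hs]
        · have hp : p ≠ '1' := fun h => hs (hseq.mpr h)
          simp [runStarts, hp, hs]
      rw [hr]
      by_cases hb : count > 1
      · rw [if_pos hb]
        split_ifs <;> omega
      · rw [if_neg hb]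
        rw [ih (pre ++ ['1']) '1' count (seq + 1)
          (by rw [hpre]; simp) hcount (by omega)
          (by simp; omega) (by intro _; simp)]
        split_ifs <;> omega
    · rw [if_neg hc]
      have hr : runStarts p (c :: rest) = runStarts c rest := by
        simp [runStarts, hc]
      rw [hr]
      by_cases hs : seq ≠ 0
      · rw [if_pos hs]
        by_cases hb : count + 1 > 1
        · rw [if_pos hb]
          split_ifs <;> omega
        · rw [if_neg hb]
          rw [ih (pre ++ [c]) c (count + 1) 0
            (by rw [hpre]; simp) (by omega) le_rfl
            (by simp [hc]) (by simp)]
          split_ifs <;> omega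
      · rw [if_neg hs]
        by_cases hb : count > 1
        · rw [if_pos hb]
          split_ifs <;> omega
        · rw [if_neg hb]
          rw [ih (pre ++ [c]) c count seq
            (by rw [hpre]; simp) hcount hseqnn
            ⟨fun h => absurd h hs, fun h => absurd h hc⟩ (fun h => absurd h hs)]

-- ===== VERDICT (by name: the statement is the Claim_ definition above) =====
theorem oneSegment_spec : Claim_equal_oneSegment := by
  intro str _
  unfold Spec_oneSegment oneSegment oneSegment_alt
  rw [oneSegmentLoop_eq str str.toList [] '0' 0 0 (by simp) le_rfl le_rfl
    (by simp) (by simp)]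
  rw [foldl_zip_runStarts]
  have := runStarts_nonneg '0' str.toList
  simp only [zero_add]
  split_ifs <;> omega
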